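-- pv_equiv track=rewrite | github.com/pypi-data/pypi-mirror-404 | packages/flowquery/flowquery-1.0.9.tar.gz/flowquery-1.0.9/src/utils/string_utils.py | remove_escaped_braces
-- ===== SOURCE A (Python) =====
-- def remove_escaped_braces(s: str) -> str:
--     """Removes escaped braces ({{ and }}) from f-strings.
--
--     Args:
--         s: The string to process
--
--     Returns:
--         The string with escaped braces resolved
--     """
--     unescaped = ''
--     i = 0
--     while i < len(s):
--         if i < len(s) - 1 and ((s[i] == '{' and s[i + 1] == '{') or (s[i] == '}' and s[i + 1] == '}')):
--             i += 1
--         unescaped += s[i]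
--         i += 1
--     return unescaped
-- ===== SOURCE B (Python) =====
-- def remove_escaped_braces(s: str) -> str:
--     """Removes escaped braces ({{ and }}) from f-strings.
--
--     Two independent library passes: '{' and '}' are distinct, so collapsing
--     '{{' first cannot create or destroy a '}}' pair, and str.replace's
--     left-to-right non-overlapping matching reproduces the manual scan exactly.
--     """
--     return s.replace('{{', '{').replace('}}', '}')
-- ===== Notes on version B (the rewrite author's own statement) =====
-- stated objective: simpler
-- what changed: Replaces the hand-written index-scanning loop with two str.replace library passes ('{{'->'{' then '}}'->'}'), which are order-independent because the brace characters are distinct.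
import Mathlib
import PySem

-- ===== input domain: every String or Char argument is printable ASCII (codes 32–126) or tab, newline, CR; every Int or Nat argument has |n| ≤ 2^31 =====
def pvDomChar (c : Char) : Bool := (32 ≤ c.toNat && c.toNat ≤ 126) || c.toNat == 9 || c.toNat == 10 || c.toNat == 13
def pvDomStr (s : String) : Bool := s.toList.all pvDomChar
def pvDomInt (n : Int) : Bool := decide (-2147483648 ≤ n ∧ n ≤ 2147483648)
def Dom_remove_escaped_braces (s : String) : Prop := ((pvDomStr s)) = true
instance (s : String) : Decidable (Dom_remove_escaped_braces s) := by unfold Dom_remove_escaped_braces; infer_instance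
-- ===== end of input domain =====

-- B replaces A's hand-written index-scanning loop with two independent library
-- replace passes ('{{'→'{' then '}}'→'}'); objective: simpler.

-- ===== PORT A =====
-- A's while-loop: index i, skip ahead over a doubled brace, append s[i] (always in
-- range, so getD's default is never used), i += 1.
def raGo (cs : List Char) (i : Nat) (acc : List Char) : List Char :=
  if i < cs.length then
    -- Python sets i' = i+1 when a doubled brace starts at i (else i' = i),
    -- appends s[i'] and continues from i' + 1; the two branches inline i'.
    if i < cs.length - 1 ∧
        ((cs.getD i ' ' = '{' ∧ cs.getD (i+1) ' ' = '{') ∨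
         (cs.getD i ' ' = '}' ∧ cs.getD (i+1) ' ' = '}')) then
      raGo cs (i + 2) (acc ++ [cs.getD (i+1) ' '])
    else
      raGo cs (i + 1) (acc ++ [cs.getD i ' '])
  else acc
termination_by cs.length - i
decreasing_by
  · omega
  · omega

def remove_escaped_braces (s : String) : String :=
  String.ofList (raGo s.toList 0 [])

-- ===== PORT B =====
def remove_escaped_braces_alt (s : String) : String :=
  PySem.Str.replace (PySem.Str.replace s "{{" "{") "}}" "}"

-- ===== PRECONDITION & SPEC =====
def Spec_remove_escaped_braces (s : String) (out : String) : Prop := out = remove_escaped_braces_alt s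
instance (s : String) (out : String) : Decidable (Spec_remove_escaped_braces s out) := by unfold Spec_remove_escaped_braces; infer_instance

-- ===== CLAIM (what is proved, stated in full; the proofs are below) =====
def Claim_equal_remove_escaped_braces : Prop := ∀ (s : String), Dom_remove_escaped_braces s → Spec_remove_escaped_braces s (remove_escaped_braces s)

-- ===== LEMMAS AND PROOFS =====

-- middle layer: A's loop as a structural scan over the character list
def scanA : List Char → List Char
  | a :: b :: t =>
      if (a = '{' ∧ b = '{') ∨ (a = '}' ∧ b = '}') then b :: scanA t
      else a :: scanA (b :: t)
  | l => l

-- one replace pass with pattern [c,c] → [c], structurally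
def rep2 (c : Char) : List Char → List Char
  | a :: b :: t => if a = c ∧ b = c then c :: rep2 c t else a :: rep2 c (b :: t)
  | l => l

theorem rep2_head (c a : Char) (xs : List Char) :
    ∃ ys, rep2 c (a :: xs) = a :: ys := by
  cases xs with
  | nil => exact ⟨[], rfl⟩
  | cons b t =>
      by_cases h : a = c ∧ b = c
      · exact ⟨rep2 c t, by simp [rep2, h, h.1]⟩
      · exact ⟨rep2 c (b :: t), by simp [rep2, h]⟩

theorem rep2_cons_ne (c a : Char) (xs : List Char) (h : a ≠ c) :
    rep2 c (a :: xs) = a :: rep2 c xs := by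
  cases xs with
  | nil => simp [rep2]
  | cons b t => simp only [rep2]; rw [if_neg (fun hh => h hh.1)]

theorem rep2_cons_cons_ne (c b : Char) (t : List Char) (h : b ≠ c) :
    rep2 c (c :: b :: t) = c :: rep2 c (b :: t) := by
  simp only [rep2]; rw [if_neg (fun hh => h hh.2)]

-- scanA = the '}}' pass after the '{{' pass
theorem scanA_eq_rep2 : ∀ (n : Nat) (l : List Char), l.length ≤ n →
    scanA l = rep2 '}' (rep2 '{' l) := by
  intro n
  induction n with
  | zero => intro l hl; interval_cases h : l.length <;> simp_all [List.length_eq_zero_iff, scanA, rep2]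
  | succ n ih =>
    intro l hl
    match l with
    | [] => rfl
    | [a] => simp [scanA, rep2]
    | a :: b :: t =>
      by_cases hbb : (a = '{' ∧ b = '{') ∨ (a = '}' ∧ b = '}')
      · rcases hbb with ⟨ha, hb⟩ | ⟨ha, hb⟩
        · subst ha; subst hb
          have h1 : rep2 '{' ('{' :: '{' :: t) = '{' :: rep2 '{' t := by simp [rep2]
          have h2 := rep2_cons_ne '}' '{' (rep2 '{' t) (by decide)
          have ihx : scanA t = rep2 '}' (rep2 '{' t) := ih t (by simpa using Nat.le_of_succ_le_succ (Nat.le_of_succ_le hl))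
          simp [scanA, h1, h2, ihx]
        · subst ha; subst hb
          have h1 : rep2 '{' ('}' :: '}' :: t) = '}' :: '}' :: rep2 '{' t := by
            rw [rep2_cons_ne '{' '}' _ (by decide), rep2_cons_ne '{' '}' _ (by decide)]
          have h2 : rep2 '}' ('}' :: '}' :: rep2 '{' t) = '}' :: rep2 '}' (rep2 '{' t) := by
            simp [rep2]
          have ihx : scanA t = rep2 '}' (rep2 '{' t) := ih t (by simpa using Nat.le_of_succ_le_succ (Nat.le_of_succ_le hl))
          simp [scanA, h1, h2, ihx]
      · have ihx : scanA (b :: t) = rep2 '}' (rep2 '{' (b :: t)) := ih (b :: t) (by simpa using Nat.le_of_succ_le_succ hl)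
        have hscan : scanA (a :: b :: t) = a :: scanA (b :: t) := by simp [scanA, hbb]
        by_cases ha1 : a = '{'
        · subst ha1
          have hb1 : b ≠ '{' := fun h => hbb (Or.inl ⟨rfl, h⟩)
          have h1 : rep2 '{' ('{' :: b :: t) = '{' :: rep2 '{' (b :: t) :=
            rep2_cons_cons_ne '{' b t hb1
          rw [hscan, h1, rep2_cons_ne '}' '{' _ (by decide), ihx]
        · by_cases ha2 : a = '}'
          · subst ha2
            have hb2 : b ≠ '}' := fun h => hbb (Or.inr ⟨rfl, h⟩)
            have h1 : rep2 '{' ('}' :: b :: t) = '}' :: rep2 '{' (b :: t) :=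
              rep2_cons_ne '{' '}' _ (by decide)
            obtain ⟨ys, hys⟩ := rep2_head '{' b t
            have h2 : rep2 '}' ('}' :: rep2 '{' (b :: t)) = '}' :: rep2 '}' (rep2 '{' (b :: t)) := by
              rw [hys, rep2_cons_cons_ne '}' b ys hb2, ← hys]
            rw [hscan, h1, h2, ihx]
          · rw [hscan, rep2_cons_ne '{' a _ ha1, rep2_cons_ne '}' a _ ha2, ihx]

-- PySem's replace with a nonempty two-identical-char pattern computes rep2
theorem go_eq_rep2 (c : Char) : ∀ (fuel : Nat) (l acc : List Char), l.length ≤ fuel →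
    PySem.Chars.replace.go [c, c] [c] fuel l acc = acc.reverse ++ rep2 c l := by
  intro fuel
  induction fuel with
  | zero =>
    intro l acc hl
    have : l = [] := List.length_eq_zero_iff.mp (Nat.le_zero.mp hl)
    subst this; simp [PySem.Chars.replace.go, rep2]
  | succ fuel ih =>
    intro l acc hl
    match l with
    | [] => simp [PySem.Chars.replace.go, rep2]
    | a :: t =>
      by_cases hp : List.isPrefixOf [c, c] (a :: t) = true
      · obtain ⟨u, hu⟩ := List.isPrefixOf_iff_prefix.mp hp
        have hau : a :: t = c :: c :: u := by simpa using hu.symm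
        rw [show PySem.Chars.replace.go [c, c] [c] (fuel + 1) (a :: t) acc
              = PySem.Chars.replace.go [c, c] [c] fuel ((a :: t).drop 2) ([c].reverse ++ acc) by
            rw [PySem.Chars.replace.go]; simp [hp]]
        rw [hau] at hl ⊢
        simp only [List.drop, List.reverse_singleton, List.singleton_append]
        rw [ih u (c :: acc) (by simpa using Nat.le_of_succ_le (Nat.le_of_succ_le_succ hl))]
        simp [rep2]
      · have hstep : PySem.Chars.replace.go [c, c] [c] (fuel + 1) (a :: t) acc
              = PySem.Chars.replace.go [c, c] [c] fuel t (a :: acc) := by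
          rw [PySem.Chars.replace.go]; simp [hp]
        rw [hstep, ih t (a :: acc) (Nat.le_of_succ_le_succ hl)]
        have hne : rep2 c (a :: t) = a :: rep2 c t := by
          rcases eq_or_ne a c with rfl | hac
          · cases t with
            | nil => simp [rep2]
            | cons b u =>
              have hbc : b ≠ a := by
                intro h; apply hp
                rw [h]; simp [List.isPrefixOf_iff_prefix]
              exact rep2_cons_cons_ne a b u hbc
          · exact rep2_cons_ne c a t hac
        simp [hne]

theorem replace_eq_rep2 (c : Char) (l : List Char) :
    PySem.Chars.replace l [c, c] [c] = rep2 c l := by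
  rw [PySem.Chars.replace]
  simp only [List.isEmpty_cons, Bool.false_eq_true, if_false]
  simpa using go_eq_rep2 c l.length l [] le_rfl

-- A's index loop computes scanA of the remaining suffix
theorem raGo_eq_scanA : ∀ (cs : List Char) (i : Nat) (acc : List Char),
    raGo cs i acc = acc ++ scanA (cs.drop i) := by
  intro cs
  have main : ∀ (k i : Nat) (acc : List Char), cs.length - i ≤ k →
      raGo cs i acc = acc ++ scanA (cs.drop i) := by
    intro k
    induction k with
    | zero =>
      intro i acc h
      have hge : cs.length ≤ i := by omega
      rw [raGo]
      simp [Nat.not_lt.mpr hge, List.drop_eq_nil_of_le hge, scanA]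
    | succ k ih =>
      intro i acc h
      by_cases hi : i < cs.length
      · have hdrop : cs.drop i = cs[i] :: cs.drop (i + 1) := List.drop_eq_getElem_cons hi
        have hgd : cs.getD i ' ' = cs[i] := by simp [List.getD_eq_getElem?_getD, hi]
        by_cases hc : i < cs.length - 1 ∧
            ((cs.getD i ' ' = '{' ∧ cs.getD (i+1) ' ' = '{') ∨
             (cs.getD i ' ' = '}' ∧ cs.getD (i+1) ' ' = '}'))
        · have hi1 : i + 1 < cs.length := by omega
          have hgd1 : cs.getD (i+1) ' ' = cs[i+1] := by simp [List.getD_eq_getElem?_getD, hi1]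
          have hdrop1 : cs.drop (i+1) = cs[i+1] :: cs.drop (i + 2) := List.drop_eq_getElem_cons hi1
          have hstep : raGo cs i acc = raGo cs (i + 2) (acc ++ [cs[i+1]]) := by
            rw [raGo, if_pos hi, if_pos hc, hgd1]
          rw [hstep, ih (i + 2) _ (by omega)]
          have hcond : (cs[i] = '{' ∧ cs[i+1] = '{') ∨ (cs[i] = '}' ∧ cs[i+1] = '}') := by
            rw [hgd, hgd1] at hc; exact hc.2
          rw [hdrop, hdrop1]
          simp [scanA, hcond]
        · have hstep : raGo cs i acc = raGo cs (i + 1) (acc ++ [cs[i]]) := by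
            rw [raGo, if_pos hi, if_neg hc, hgd]
          rw [hstep, ih (i + 1) _ (by omega), hdrop]
          by_cases ht : i + 1 < cs.length
          · have hdrop1 : cs.drop (i+1) = cs[i+1] :: cs.drop (i + 2) := List.drop_eq_getElem_cons ht
            have hgd1 : cs.getD (i+1) ' ' = cs[i+1] := by simp [List.getD_eq_getElem?_getD, ht]
            have hncond : ¬ ((cs[i] = '{' ∧ cs[i+1] = '{') ∨ (cs[i] = '}' ∧ cs[i+1] = '}')) := by
              intro hcc
              exact hc ⟨by omega, by rw [hgd, hgd1]; exact hcc⟩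
            rw [hdrop1]
            simp [scanA, hncond]
          · have : cs.drop (i+1) = [] := List.drop_eq_nil_of_le (by omega)
            rw [this]
            simp [scanA]
      · rw [raGo]
        simp [Nat.not_lt.mpr (Nat.not_lt.mp hi), List.drop_eq_nil_of_le (Nat.not_lt.mp hi), scanA]
  exact fun i acc => main (cs.length - i) i acc le_rfl

-- ===== VERDICT (by name: the statement is the Claim_ definition above) =====
theorem remove_escaped_braces_spec : Claim_equal_remove_escaped_braces := by
  intro s _
  unfold Spec_remove_escaped_braces remove_escaped_braces remove_escaped_braces_alt
  rw [raGo_eq_scanA]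
  have h1 : (PySem.Str.replace s "{{" "{").toList = rep2 '{' s.toList := by
    rw [PySem.Str.toList_replace]
    simpa using replace_eq_rep2 '{' s.toList
  have h2 : PySem.Str.replace (PySem.Str.replace s "{{" "{") "}}" "}"
      = String.ofList (rep2 '}' (rep2 '{' s.toList)) := by
    rw [PySem.Str.replace, h1]
    congr 1
    simpa using replace_eq_rep2 '}' (rep2 '{' s.toList)
  rw [h2]
  simp [scanA_eq_rep2 s.toList.length s.toList le_rfl]
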